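-- pv_equiv track=rewrite | github.com/hdp0545/TIL | 2.Algorithm/pycharm/programmers Study/Ntech/3_p.py | same_node
-- ===== SOURCE A (Python) =====
-- def same_node(target, goal, i):
--     stack = [(i, 0)]
--     while stack:
--         t_i, g_i = stack.pop()
--         if target[t_i][0] * goal[g_i][0] < 0 or target[t_i][1] * goal[g_i][1] < 0 :
--             return False
--         else:
--             if target[t_i][0] > 0:
--                 stack.append((target[t_i][0], goal[g_i][0]))
--             if target[t_i][1] > 0:
--                 stack.append((target[t_i][1], goal[g_i][1]))
--     return True
-- ===== SOURCE B (Python) =====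
-- def same_node(target, goal, i):
--     frontier = [(i, 0)]
--     while frontier:
--         if any(target[t][0] * goal[g][0] < 0 or target[t][1] * goal[g][1] < 0
--                for t, g in frontier):
--             return False
--         frontier = [(target[t][k], goal[g][k])
--                     for t, g in frontier for k in (0, 1) if target[t][k] > 0]
--     return True
-- ===== Notes on version B (the rewrite author's own statement) =====
-- stated objective: alternative
-- what changed: Replaced A's LIFO stack depth-first worklist by a breadth-first level-by-level sweep: each round checks all nodes of the current level at once with any() and builds the whole next level with a comprehension, so no stack and no per-node push/pop remain.
-- outside the precondition, e.g. on same_node([[1, 0], [5, 0]], [[1, 0], [-1, 0]], 0): A returns False, B returns False; on same_node([[1, 0], [1, 0]], [[1, 0], [-1, 0]], 0): A returns False, B returns False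
import Mathlib
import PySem

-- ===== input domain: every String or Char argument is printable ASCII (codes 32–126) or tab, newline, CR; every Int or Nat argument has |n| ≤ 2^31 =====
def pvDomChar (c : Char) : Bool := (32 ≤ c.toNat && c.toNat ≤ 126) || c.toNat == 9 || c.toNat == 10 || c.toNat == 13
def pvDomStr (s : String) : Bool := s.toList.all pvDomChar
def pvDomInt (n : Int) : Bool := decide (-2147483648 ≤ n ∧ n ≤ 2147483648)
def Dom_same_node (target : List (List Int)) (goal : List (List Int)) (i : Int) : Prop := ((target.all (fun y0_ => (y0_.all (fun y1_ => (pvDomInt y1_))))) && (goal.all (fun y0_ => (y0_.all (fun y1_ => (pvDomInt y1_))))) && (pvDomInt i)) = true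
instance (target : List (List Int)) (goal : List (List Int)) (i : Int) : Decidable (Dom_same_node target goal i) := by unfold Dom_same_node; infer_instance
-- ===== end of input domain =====

-- B replaces A's LIFO-stack depth-first worklist by a breadth-first level-by-level sweep (check a whole
-- level with any(), build the whole next level with a comprehension); objective: alternative algorithm,
-- same cost. Equivalence is claimed on Pre_ (well-formed trees), where neither program raises or diverges.

-- ===== PORT A =====
-- xs[t] with Python's negative-index rule; the default [] / 0 of pyGetD is never reached under Pre_
def pvRow (xs : List (List Int)) (t : Int) : List Int := PySem.List.pyGetD xs t []
def pvEnt (row : List Int) (k : Int) : Int := PySem.List.pyGetD row k 0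

-- A's while-loop over the stack (head = top of stack); the fuel only makes the loop total in Lean and is
-- never exhausted under Pre_ (the traversal visits < 2^(len+1) nodes there)
def same_node_loop (target : List (List Int)) (goal : List (List Int)) : Nat → List (Int × Int) → Bool
  | _, [] => true
  | 0, _ :: _ => true   -- fuel guard only; unreachable under Pre_
  | fuel+1, (t, g) :: rest =>
    if pvEnt (pvRow target t) 0 * pvEnt (pvRow goal g) 0 < 0 ∨
       pvEnt (pvRow target t) 1 * pvEnt (pvRow goal g) 1 < 0 then false
    else
      -- push left child, then right child (so the right child is popped first)
      same_node_loop target goal fuel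
        ((if 0 < pvEnt (pvRow target t) 1 then [(pvEnt (pvRow target t) 1, pvEnt (pvRow goal g) 1)] else []) ++
         (if 0 < pvEnt (pvRow target t) 0 then [(pvEnt (pvRow target t) 0, pvEnt (pvRow goal g) 0)] else []) ++
         rest)

def same_node (target : List (List Int)) (goal : List (List Int)) (i : Int) : Bool :=
  same_node_loop target goal (2 ^ (target.length + 1)) [(i, 0)]

-- ===== PORT B =====
-- Source B's any(...) generator condition over one level
def badPair (target : List (List Int)) (goal : List (List Int)) (p : Int × Int) : Bool :=
  decide (pvEnt (pvRow target p.1) 0 * pvEnt (pvRow goal p.2) 0 < 0 ∨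
          pvEnt (pvRow target p.1) 1 * pvEnt (pvRow goal p.2) 1 < 0)

-- Source B's inner comprehension 'for k in (0, 1) if target[t][k] > 0' for one pair (t, g)
def childPairs (target : List (List Int)) (goal : List (List Int)) (p : Int × Int) : List (Int × Int) :=
  (if 0 < pvEnt (pvRow target p.1) 0 then [(pvEnt (pvRow target p.1) 0, pvEnt (pvRow goal p.2) 0)] else []) ++
  (if 0 < pvEnt (pvRow target p.1) 1 then [(pvEnt (pvRow target p.1) 1, pvEnt (pvRow goal p.2) 1)] else [])

-- Source B's while-loop over whole levels; fuel = number of levels, never exhausted under Pre_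
def same_node_bfs (target : List (List Int)) (goal : List (List Int)) : Nat → List (Int × Int) → Bool
  | _, [] => true
  | 0, _ :: _ => true   -- fuel guard only; unreachable under Pre_
  | fuel+1, p :: rest =>
    if (p :: rest).any (badPair target goal) then false
    else same_node_bfs target goal fuel ((p :: rest).flatMap (childPairs target goal))

def same_node_alt (target : List (List Int)) (goal : List (List Int)) (i : Int) : Bool :=
  same_node_bfs target goal (target.length + 1) [(i, 0)]

-- ===== PRECONDITION & SPEC =====
-- target-side well-formedness: rows of length >= 2 whose positive entries are in-range child indices
-- strictly greater than their row index (so the traversal terminates and never indexes out of range)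
def TgtWF (target : List (List Int)) : Prop :=
  ∀ j, (h : j < target.length) → 2 ≤ target[j].length ∧
    ∀ e ∈ target[j], 0 < e → (j : Int) < e ∧ e < (target.length : Int)
-- goal-side well-formedness: rows of length >= 2 whose entries are in-range goal indices
def GoalWF (goal : List (List Int)) : Prop :=
  ∀ row ∈ goal, 2 ≤ row.length ∧ ∀ e ∈ row, -(goal.length : Int) ≤ e ∧ e < (goal.length : Int)
-- root-level early exit: both programs already return at the root node (sign check fails, or it
-- passes and neither child is positive), so nothing beyond the two root rows is ever touched
def RootShallow (target : List (List Int)) (goal : List (List Int)) (i : Int) : Prop :=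
  (1 ≤ (pvRow target i).length ∧ 1 ≤ (pvRow goal 0).length ∧
    pvEnt (pvRow target i) 0 * pvEnt (pvRow goal 0) 0 < 0) ∨
  (2 ≤ (pvRow target i).length ∧ 2 ≤ (pvRow goal 0).length ∧
    (pvEnt (pvRow target i) 0 * pvEnt (pvRow goal 0) 0 < 0 ∨
     pvEnt (pvRow target i) 1 * pvEnt (pvRow goal 0) 1 < 0 ∨
     (pvEnt (pvRow target i) 0 ≤ 0 ∧ pvEnt (pvRow target i) 1 ≤ 0)))

-- Pre_ = root index in range and either a root-level early exit or a globally well-formed pair of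
-- trees. It is slightly narrower than 'A returns': A can also return False when a malformed (out of
-- range / non-increasing) child index sits in a part of the tree the sign check cuts off at depth
-- >= 1; whether such an entry is reached cannot be stated in closed form (see claim cites).
def Pre_same_node (target : List (List Int)) (goal : List (List Int)) (i : Int) : Prop :=
  target ≠ [] ∧ goal ≠ [] ∧ -(target.length : Int) ≤ i ∧ i < (target.length : Int) ∧
  ((TgtWF target ∧ GoalWF goal) ∨ RootShallow target goal i)
instance (target : List (List Int)) (goal : List (List Int)) (i : Int) : Decidable (Pre_same_node target goal i) := by unfold Pre_same_node TgtWF GoalWF RootShallow; infer_instance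

def pvWitness_same_node : List (List Int) × List (List Int) × Int :=
  ([[1, 2], [0, 0], [0, 0]], [[1, 2], [0, 0], [0, 0]], 0)

def Spec_same_node (target : List (List Int)) (goal : List (List Int)) (i : Int) (out : Bool) : Prop := out = same_node_alt target goal i
instance (target : List (List Int)) (goal : List (List Int)) (i : Int) (out : Bool) : Decidable (Spec_same_node target goal i out) := by unfold Spec_same_node; infer_instance

-- ===== CLAIM (what is proved, stated in full; the proofs are below) =====
def Claim_equal_same_node : Prop := ∀ (target : List (List Int)) (goal : List (List Int)) (i : Int), Dom_same_node target goal i → Pre_same_node target goal i → Spec_same_node target goal i (same_node target goal i)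

-- ===== LEMMAS AND PROOFS =====

-- the Nat row index t denotes (Python's negative-index rule)
def jIdx (xs : List (List Int)) (t : Int) : Nat := (if t < 0 then (xs.length : Int) + t else t).toNat

-- upper bound on the number of loop iterations a node of row index jIdx t can generate
def wt (xs : List (List Int)) (t : Int) : Nat := 2 ^ (xs.length + 1 - jIdx xs t) - 1
def stackWt (xs : List (List Int)) (st : List (Int × Int)) : Nat := (st.map (fun p => wt xs p.1)).sum

def validT (xs : List (List Int)) (t : Int) : Prop := -(xs.length : Int) ≤ t ∧ t < (xs.length : Int)

-- reference judgement both ports are reduced to: per-node recursion with depth fuel (proof-only helper)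
def recCheck (target : List (List Int)) (goal : List (List Int)) : Nat → Int → Int → Bool
  | 0, _, _ => true
  | fuel+1, t, g =>
    if pvEnt (pvRow target t) 0 * pvEnt (pvRow goal g) 0 < 0 ∨
       pvEnt (pvRow target t) 1 * pvEnt (pvRow goal g) 1 < 0 then false
    else if 0 < pvEnt (pvRow target t) 0 ∧
            recCheck target goal fuel (pvEnt (pvRow target t) 0) (pvEnt (pvRow goal g) 0) = false then false
    else if 0 < pvEnt (pvRow target t) 1 ∧
            recCheck target goal fuel (pvEnt (pvRow target t) 1) (pvEnt (pvRow goal g) 1) = false then false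
    else true

theorem jIdx_lt_of_valid {xs : List (List Int)} {t : Int} (h : validT xs t) :
    jIdx xs t < xs.length := by
  obtain ⟨h1, h2⟩ := h; unfold jIdx; split <;> omega

theorem pvRow_getElem? {xs : List (List Int)} {t : Int} (h : validT xs t) :
    xs[jIdx xs t]? = some (pvRow xs t) := by
  obtain ⟨h1, h2⟩ := h
  unfold pvRow jIdx
  by_cases ht : t < 0
  · rw [if_pos ht]
    have hk : t = -(((-t).toNat : Nat) : Int) := by omega
    rw [hk, PySem.List.pyGetD_neg_natCast xs (-t).toNat [] (by omega) (by omega)]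
    have hidx : ((xs.length : Int) + -(((-t).toNat : Nat) : Int)).toNat = xs.length - (-t).toNat := by
      omega
    rw [hidx, List.getElem?_eq_getElem (by omega)]
  · rw [if_neg ht, PySem.List.pyGetD_eq_getElem xs [] (by omega) h2,
      List.getElem?_eq_getElem (by omega)]

-- what Pre_ gives about the row a valid node index reaches
theorem row_spec {target : List (List Int)}
    (htgt : TgtWF target) {t : Int} (h : validT target t) :
    2 ≤ (pvRow target t).length ∧
    ∀ e ∈ pvRow target t, 0 < e → (jIdx target t : Int) < e ∧ e < (target.length : Int) := by
  have hj := jIdx_lt_of_valid h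
  have hrow := pvRow_getElem? h
  rw [List.getElem?_eq_getElem hj] at hrow
  have := htgt (jIdx target t) hj
  rw [Option.some_inj] at hrow
  rw [hrow] at this
  exact this

theorem ent_mem {row : List Int} (hlen : 2 ≤ row.length) {k : Int} (hk0 : 0 ≤ k) (hk : k < 2) :
    pvEnt row k ∈ row := by
  unfold pvEnt
  exact PySem.List.pyGetD_mem row 0 ⟨by omega, by omega⟩

-- a positive child produced by a valid node is itself valid, with strictly larger row index
theorem child_valid {target : List (List Int)}
    (htgt : TgtWF target) {t : Int} (h : validT target t) {k : Int}
    (hk0 : 0 ≤ k) (hk : k < 2) (hc : 0 < pvEnt (pvRow target t) k) :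
    validT target (pvEnt (pvRow target t) k) ∧ jIdx target t < jIdx target (pvEnt (pvRow target t) k) := by
  obtain ⟨hlen, hall⟩ := row_spec htgt h
  have hmem := ent_mem hlen hk0 hk
  obtain ⟨hgt, hlt⟩ := hall _ hmem hc
  refine ⟨⟨by omega, hlt⟩, ?_⟩
  have hc' : jIdx target (pvEnt (pvRow target t) k) = (pvEnt (pvRow target t) k).toNat := by
    unfold jIdx; rw [if_neg (by omega)]
  have hj := jIdx_lt_of_valid h
  omega

-- fuel irrelevance for recCheck: any fuel above the remaining depth gives the same value
theorem rec_fuel {target goal : List (List Int)} (htgt : TgtWF target) :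
    ∀ f1 f2 (t g : Int), validT target t →
      target.length - jIdx target t < f1 → target.length - jIdx target t < f2 →
      recCheck target goal f1 t g = recCheck target goal f2 t g := by
  intro f1
  induction f1 with
  | zero => intro f2 t g hv h1 _; omega
  | succ k ih =>
    intro f2 t g hv h1 h2
    have hjv := jIdx_lt_of_valid hv
    obtain ⟨l, rfl⟩ : ∃ l, f2 = l + 1 := ⟨f2 - 1, by omega⟩
    simp only [recCheck]
    by_cases hC : pvEnt (pvRow target t) 0 * pvEnt (pvRow goal g) 0 < 0 ∨
        pvEnt (pvRow target t) 1 * pvEnt (pvRow goal g) 1 < 0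
    · rw [if_pos hC, if_pos hC]
    · rw [if_neg hC, if_neg hC]
      have e0 : ∀ h0 : 0 < pvEnt (pvRow target t) 0,
          recCheck target goal k (pvEnt (pvRow target t) 0) (pvEnt (pvRow goal g) 0)
          = recCheck target goal l (pvEnt (pvRow target t) 0) (pvEnt (pvRow goal g) 0) := by
        intro h0
        obtain ⟨hcv, hjc⟩ := child_valid htgt hv (k := 0) (by omega) (by omega) h0
        exact ih l _ _ hcv (by omega) (by omega)
      have e1 : ∀ h0 : 0 < pvEnt (pvRow target t) 1,
          recCheck target goal k (pvEnt (pvRow target t) 1) (pvEnt (pvRow goal g) 1)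
          = recCheck target goal l (pvEnt (pvRow target t) 1) (pvEnt (pvRow goal g) 1) := by
        intro h0
        obtain ⟨hcv, hjc⟩ := child_valid htgt hv (k := 1) (by omega) (by omega) h0
        exact ih l _ _ hcv (by omega) (by omega)
      by_cases h0 : 0 < pvEnt (pvRow target t) 0 <;>
        by_cases h1' : 0 < pvEnt (pvRow target t) 1
      · rw [e0 h0, e1 h1']
      · rw [e0 h0]; simp only [h1', false_and, if_false]
      · rw [e1 h1']; simp only [h0, false_and, if_false]
      · simp only [h0, h1', false_and, if_false]

-- A-side invariant: with enough fuel, A's stack loop computes the conjunction of recCheck over the stack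
theorem loop_eq {target goal : List (List Int)} (htgt : TgtWF target) :
    ∀ f (st : List (Int × Int)), (∀ p ∈ st, validT target p.1) →
      stackWt target st ≤ f →
      same_node_loop target goal f st
        = st.all (fun p => recCheck target goal (target.length + 1) p.1 p.2) := by
  intro f
  induction f with
  | zero =>
    intro st hv hS
    cases st with
    | nil => simp [same_node_loop]
    | cons p rest =>
      exfalso
      have hpv := hv p (by simp)
      have hj := jIdx_lt_of_valid hpv
      have h1 : 1 ≤ wt target p.1 := by
        unfold wt
        have : 2 ^ 1 ≤ 2 ^ (target.length + 1 - jIdx target p.1) :=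
          Nat.pow_le_pow_right (by norm_num) (by omega)
        omega
      unfold stackWt at hS
      simp only [List.map_cons, List.sum_cons] at hS
      omega
  | succ k ih =>
    intro st hv hS
    cases st with
    | nil => simp [same_node_loop]
    | cons p rest =>
      obtain ⟨t, g⟩ := p
      have hpv : validT target t := hv (t, g) (by simp)
      have hj := jIdx_lt_of_valid hpv
      simp only [same_node_loop]
      by_cases hC : pvEnt (pvRow target t) 0 * pvEnt (pvRow goal g) 0 < 0 ∨
          pvEnt (pvRow target t) 1 * pvEnt (pvRow goal g) 1 < 0
      · rw [if_pos hC]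
        have : recCheck target goal (target.length + 1) t g = false := by
          simp only [recCheck]; rw [if_pos hC]
        simp [this]
      · rw [if_neg hC]
        have hch0 : 0 < pvEnt (pvRow target t) 0 →
            validT target (pvEnt (pvRow target t) 0) ∧
            jIdx target t < jIdx target (pvEnt (pvRow target t) 0) :=
          fun h => child_valid htgt hpv (k := 0) (by omega) (by omega) h
        have hch1 : 0 < pvEnt (pvRow target t) 1 →
            validT target (pvEnt (pvRow target t) 1) ∧
            jIdx target t < jIdx target (pvEnt (pvRow target t) 1) :=
          fun h => child_valid htgt hpv (k := 1) (by omega) (by omega) h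
        have hb0 : 0 < pvEnt (pvRow target t) 0 →
            wt target (pvEnt (pvRow target t) 0) + 1 ≤ 2 ^ (target.length - jIdx target t) := by
          intro h
          obtain ⟨hcv, hjc⟩ := hch0 h
          have hjcl := jIdx_lt_of_valid hcv
          unfold wt
          have hm : 2 ^ (target.length + 1 - jIdx target (pvEnt (pvRow target t) 0))
              ≤ 2 ^ (target.length - jIdx target t) :=
            Nat.pow_le_pow_right (by norm_num) (by omega)
          have h1 : 1 ≤ 2 ^ (target.length + 1 - jIdx target (pvEnt (pvRow target t) 0)) :=
            Nat.one_le_two_pow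
          omega
        have hb1 : 0 < pvEnt (pvRow target t) 1 →
            wt target (pvEnt (pvRow target t) 1) + 1 ≤ 2 ^ (target.length - jIdx target t) := by
          intro h
          obtain ⟨hcv, hjc⟩ := hch1 h
          have hjcl := jIdx_lt_of_valid hcv
          unfold wt
          have hm : 2 ^ (target.length + 1 - jIdx target (pvEnt (pvRow target t) 1))
              ≤ 2 ^ (target.length - jIdx target t) :=
            Nat.pow_le_pow_right (by norm_num) (by omega)
          have h1 : 1 ≤ 2 ^ (target.length + 1 - jIdx target (pvEnt (pvRow target t) 1)) :=
            Nat.one_le_two_pow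
          omega
        set st2 := ((if 0 < pvEnt (pvRow target t) 1 then
              [(pvEnt (pvRow target t) 1, pvEnt (pvRow goal g) 1)] else []) ++
            (if 0 < pvEnt (pvRow target t) 0 then
              [(pvEnt (pvRow target t) 0, pvEnt (pvRow goal g) 0)] else []) ++ rest)
          with hst2
        have hv2 : ∀ p ∈ st2, validT target p.1 := by
          intro p hp
          rw [hst2] at hp
          simp only [List.mem_append] at hp
          rcases hp with (hp | hp) | hp
          · rcases Decidable.em (0 < pvEnt (pvRow target t) 1) with h | h
            · rw [if_pos h] at hp; simp at hp; rw [hp]; exact (hch1 h).1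
            · rw [if_neg h] at hp; simp at hp
          · rcases Decidable.em (0 < pvEnt (pvRow target t) 0) with h | h
            · rw [if_pos h] at hp; simp at hp; rw [hp]; exact (hch0 h).1
            · rw [if_neg h] at hp; simp at hp
          · exact hv p (by simp [hp])
        have hwt2 : 2 ^ (target.length - jIdx target t) + 2 ^ (target.length - jIdx target t)
            = 2 ^ (target.length + 1 - jIdx target t) := by
          rw [show target.length + 1 - jIdx target t = (target.length - jIdx target t) + 1 by omega,
            pow_succ]
          omega
        have hS2 : stackWt target st2 ≤ k := by
          have hwtt : wt target t = 2 ^ (target.length + 1 - jIdx target t) - 1 := rfl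
          have hE1 : 1 ≤ 2 ^ (target.length - jIdx target t) := Nat.one_le_two_pow
          unfold stackWt at hS ⊢
          rw [hst2]
          simp only [List.map_append, List.sum_append, List.map_cons, List.sum_cons,
            List.map_nil, List.sum_nil] at hS ⊢
          rcases Decidable.em (0 < pvEnt (pvRow target t) 0) with h0 | h0 <;>
            rcases Decidable.em (0 < pvEnt (pvRow target t) 1) with h1' | h1' <;>
            simp only [h0, h1', if_true, if_false, List.map_cons, List.map_nil, List.sum_cons,
              List.sum_nil]
          · have a0 := hb0 h0; have a1 := hb1 h1'; omega
          · have a0 := hb0 h0; omega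
          · have a1 := hb1 h1'; omega
          · omega
        rw [ih st2 hv2 hS2]
        -- fold the two pushed children into recCheck (n+1) t g
        have hrec : recCheck target goal (target.length + 1) t g
            = (if 0 < pvEnt (pvRow target t) 0 ∧
                  recCheck target goal (target.length + 1) (pvEnt (pvRow target t) 0)
                    (pvEnt (pvRow goal g) 0) = false then false
               else if 0 < pvEnt (pvRow target t) 1 ∧
                  recCheck target goal (target.length + 1) (pvEnt (pvRow target t) 1)
                    (pvEnt (pvRow goal g) 1) = false then false
               else true) := by
          conv_lhs => rw [recCheck]
          rw [if_neg hC]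
          have r0 : ∀ h : 0 < pvEnt (pvRow target t) 0,
              recCheck target goal target.length (pvEnt (pvRow target t) 0)
                  (pvEnt (pvRow goal g) 0)
                = recCheck target goal (target.length + 1) (pvEnt (pvRow target t) 0)
                  (pvEnt (pvRow goal g) 0) := by
            intro h
            obtain ⟨hcv, hjc⟩ := hch0 h
            have hjcl := jIdx_lt_of_valid hcv
            exact rec_fuel htgt _ _ _ _ hcv (by omega) (by omega)
          have r1 : ∀ h : 0 < pvEnt (pvRow target t) 1,
              recCheck target goal target.length (pvEnt (pvRow target t) 1)
                  (pvEnt (pvRow goal g) 1)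
                = recCheck target goal (target.length + 1) (pvEnt (pvRow target t) 1)
                  (pvEnt (pvRow goal g) 1) := by
            intro h
            obtain ⟨hcv, hjc⟩ := hch1 h
            have hjcl := jIdx_lt_of_valid hcv
            exact rec_fuel htgt _ _ _ _ hcv (by omega) (by omega)
          by_cases h0 : 0 < pvEnt (pvRow target t) 0 <;>
            by_cases h1' : 0 < pvEnt (pvRow target t) 1
          · rw [r0 h0, r1 h1']
          · rw [r0 h0]; simp only [h1', false_and, if_false]
          · rw [r1 h1']; simp only [h0, false_and, if_false]
          · simp only [h0, h1', false_and, if_false]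
        simp only [hst2, List.all_cons, List.all_append]
        rw [hrec]
        by_cases h0 : 0 < pvEnt (pvRow target t) 0 <;>
          by_cases h1' : 0 < pvEnt (pvRow target t) 1 <;>
          simp only [h0, h1', if_true, if_false, List.nil_append, List.cons_append,
            List.append_nil, List.all_cons, List.all_append, List.all_nil, List.all_eq_true,
            true_and, and_true] <;>
        · cases hx : recCheck target goal (target.length + 1) (pvEnt (pvRow target t) 0)
              (pvEnt (pvRow goal g) 0) <;>
          cases hy : recCheck target goal (target.length + 1) (pvEnt (pvRow target t) 1)
              (pvEnt (pvRow goal g) 1) <;>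
          simp [hx, hy, h0, h1', List.all_eq_true]

-- pointwise congruence for List.all
theorem all_pointwise {α : Type} (l : List α) (p q : α → Bool)
    (h : ∀ x ∈ l, p x = q x) : l.all p = l.all q := by
  induction l with
  | nil => rfl
  | cons a l ih =>
    simp only [List.all_cons, h a (by simp), ih (fun x hx => h x (by simp [hx]))]

-- one step of recCheck at a non-failing node equals the conjunction over its child pairs
theorem rec_step {target goal : List (List Int)} (htgt : TgtWF target) {t g : Int}
    (hv : validT target t) (hC : badPair target goal (t, g) = false) :
    recCheck target goal (target.length + 1) t g
      = (childPairs target goal (t, g)).all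
          (fun p => recCheck target goal (target.length + 1) p.1 p.2) := by
  have hC' : ¬ (pvEnt (pvRow target t) 0 * pvEnt (pvRow goal g) 0 < 0 ∨
      pvEnt (pvRow target t) 1 * pvEnt (pvRow goal g) 1 < 0) := by
    intro h; rw [badPair] at hC; simp at hC; omega
  have hjv := jIdx_lt_of_valid hv
  conv_lhs => rw [recCheck]
  rw [if_neg hC']
  have r0 : ∀ h : 0 < pvEnt (pvRow target t) 0,
      recCheck target goal target.length (pvEnt (pvRow target t) 0) (pvEnt (pvRow goal g) 0)
        = recCheck target goal (target.length + 1) (pvEnt (pvRow target t) 0)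
            (pvEnt (pvRow goal g) 0) := by
    intro h
    obtain ⟨hcv, hjc⟩ := child_valid htgt hv (k := 0) (by omega) (by omega) h
    have hjcl := jIdx_lt_of_valid hcv
    exact rec_fuel htgt _ _ _ _ hcv (by omega) (by omega)
  have r1 : ∀ h : 0 < pvEnt (pvRow target t) 1,
      recCheck target goal target.length (pvEnt (pvRow target t) 1) (pvEnt (pvRow goal g) 1)
        = recCheck target goal (target.length + 1) (pvEnt (pvRow target t) 1)
            (pvEnt (pvRow goal g) 1) := by
    intro h
    obtain ⟨hcv, hjc⟩ := child_valid htgt hv (k := 1) (by omega) (by omega) h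
    exact rec_fuel htgt _ _ _ _ hcv (by omega) (by omega)
  unfold childPairs
  by_cases h0 : 0 < pvEnt (pvRow target t) 0 <;>
    by_cases h1' : 0 < pvEnt (pvRow target t) 1 <;>
    simp only [h0, h1', if_true, if_false, List.nil_append, List.cons_append, List.append_nil,
      List.all_cons, List.all_nil, and_true, true_and, false_and, if_false]
  · rw [r0 h0, r1 h1']
    cases hx : recCheck target goal (target.length + 1) (pvEnt (pvRow target t) 0)
        (pvEnt (pvRow goal g) 0) <;>
      cases hy : recCheck target goal (target.length + 1) (pvEnt (pvRow target t) 1)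
        (pvEnt (pvRow goal g) 1) <;> simp [hx, hy, h0, h1']
  · rw [r0 h0]
    cases hx : recCheck target goal (target.length + 1) (pvEnt (pvRow target t) 0)
        (pvEnt (pvRow goal g) 0) <;> simp [hx, h0]
  · rw [r1 h1']
    cases hy : recCheck target goal (target.length + 1) (pvEnt (pvRow target t) 1)
        (pvEnt (pvRow goal g) 1) <;> simp [hy, h1']

-- children of a valid node are valid, one level deeper
theorem childPairs_valid {target goal : List (List Int)} (htgt : TgtWF target) {p q : Int × Int}
    (hv : validT target p.1) (hq : q ∈ childPairs target goal p) :
    validT target q.1 ∧ jIdx target p.1 < jIdx target q.1 := by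
  unfold childPairs at hq
  simp only [List.mem_append] at hq
  rcases hq with hq | hq
  · rcases Decidable.em (0 < pvEnt (pvRow target p.1) 0) with h | h
    · rw [if_pos h] at hq; simp at hq; rw [hq]
      exact child_valid htgt hv (k := 0) (by omega) (by omega) h
    · rw [if_neg h] at hq; simp at hq
  · rcases Decidable.em (0 < pvEnt (pvRow target p.1) 1) with h | h
    · rw [if_pos h] at hq; simp at hq; rw [hq]
      exact child_valid htgt hv (k := 1) (by omega) (by omega) h
    · rw [if_neg h] at hq; simp at hq

-- B-side invariant: the breadth-first sweep computes the conjunction of recCheck over the frontier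
theorem bfs_eq {target goal : List (List Int)} (htgt : TgtWF target) :
    ∀ f (fr : List (Int × Int)),
      (∀ p ∈ fr, validT target p.1 ∧ target.length - jIdx target p.1 < f) →
      same_node_bfs target goal f fr
        = fr.all (fun p => recCheck target goal (target.length + 1) p.1 p.2) := by
  intro f
  induction f with
  | zero =>
    intro fr hv
    cases fr with
    | nil => simp [same_node_bfs]
    | cons p rest =>
      exfalso
      obtain ⟨hpv, hb⟩ := hv p (by simp)
      omega
  | succ k ih =>
    intro fr hv
    cases fr with
    | nil => simp [same_node_bfs]
    | cons p rest =>
      simp only [same_node_bfs]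
      by_cases hany : (p :: rest).any (badPair target goal) = true
      · rw [if_pos hany]
        obtain ⟨q, hq, hbad⟩ := List.any_eq_true.mp hany
        symm
        rw [List.all_eq_false]
        refine ⟨q, hq, ?_⟩
        have : recCheck target goal (target.length + 1) q.1 q.2 = false := by
          simp only [recCheck]
          rw [if_pos (by rw [badPair] at hbad; exact of_decide_eq_true hbad)]
        simp [this]
      · rw [if_neg hany]
        have hnb : ∀ q ∈ p :: rest, badPair target goal q = false := by
          intro q hq
          cases hb : badPair target goal q
          · rfl
          · exact absurd (List.any_eq_true.mpr ⟨q, hq, hb⟩) hany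
        have hv2 : ∀ q ∈ (p :: rest).flatMap (childPairs target goal),
            validT target q.1 ∧ target.length - jIdx target q.1 < k := by
          intro q hq
          obtain ⟨p', hp', hq'⟩ := List.mem_flatMap.mp hq
          obtain ⟨hpv, hpb⟩ := hv p' hp'
          obtain ⟨hqv, hlt⟩ := childPairs_valid htgt hpv hq'
          have := jIdx_lt_of_valid hqv
          exact ⟨hqv, by omega⟩
        rw [ih _ hv2, List.all_flatMap]
        symm
        apply all_pointwise
        intro q hq
        exact rec_step htgt (hv q hq).1 (hnb q hq)

-- ===== VERDICT (by name: the statement is the Claim_ definition above) =====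
theorem same_node_spec : Claim_equal_same_node := by
  intro target goal i _hdom hpre
  obtain ⟨ht0, hg0, hi1, hi2, hrest⟩ := hpre
  unfold Spec_same_node same_node same_node_alt
  have hv : validT target i := ⟨hi1, hi2⟩
  have hj := jIdx_lt_of_valid hv
  rcases hrest with ⟨htgt, -⟩ | hshallow
  · rw [loop_eq htgt _ [(i, 0)] (by intro p hp; simp at hp; rw [hp]; exact hv)
      (by
        unfold stackWt wt
        simp only [List.map_cons, List.map_nil, List.sum_cons, List.sum_nil]
        have h1 : 2 ^ (target.length + 1 - jIdx target i) ≤ 2 ^ (target.length + 1) :=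
          Nat.pow_le_pow_right (by norm_num) (by omega)
        have h2 : (2 : Nat) ^ (target.length + 1) = 2 * 2 ^ target.length := by
          rw [pow_succ]; ring
        omega)]
    rw [bfs_eq htgt _ [(i, 0)]
      (by intro p hp; simp at hp; rw [hp]; exact ⟨hv, by omega⟩)]
  · -- root-level early exit: both programs decide at the first node
    obtain ⟨m, hm⟩ : ∃ m, 2 ^ (target.length + 1) = m + 1 :=
      ⟨2 ^ (target.length + 1) - 1, by
        have := Nat.one_le_two_pow (n := target.length + 1); omega⟩
    rw [hm]
    by_cases hf : pvEnt (pvRow target i) 0 * pvEnt (pvRow goal 0) 0 < 0 ∨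
        pvEnt (pvRow target i) 1 * pvEnt (pvRow goal 0) 1 < 0
    · have hbad : badPair target goal (i, 0) = true := by
        simp only [badPair]; exact decide_eq_true hf
      simp [same_node_loop, same_node_bfs, hbad, if_pos hf]
    · have hc : pvEnt (pvRow target i) 0 ≤ 0 ∧ pvEnt (pvRow target i) 1 ≤ 0 := by
        rcases hshallow with ⟨-, -, h⟩ | ⟨-, -, h | h | h⟩
        · exact absurd (Or.inl h) hf
        · exact absurd (Or.inl h) hf
        · exact absurd (Or.inr h) hf
        · exact h
      have hbad : badPair target goal (i, 0) = false := by
        simp only [badPair]; exact decide_eq_false hf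
      have hch : childPairs target goal (i, 0) = [] := by
        simp only [childPairs]
        rw [if_neg (show ¬ 0 < pvEnt (pvRow target i) 0 by omega),
          if_neg (show ¬ 0 < pvEnt (pvRow target i) 1 by omega)]
        rfl
      simp only [same_node_loop, same_node_bfs, List.any_cons, List.any_nil, Bool.or_false,
        hbad, if_neg hf, List.flatMap_cons, List.flatMap_nil, hch,
        if_neg (show ¬ 0 < pvEnt (pvRow target i) 0 by omega),
        if_neg (show ¬ 0 < pvEnt (pvRow target i) 1 by omega)]
      simp [same_node_loop, same_node_bfs]
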